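-- pv_equiv track=rewrite | github.com/wattaihei/ProgrammingContest | AtCoder/エイジング2020/probF.py | PolynomialComplemention
-- ===== SOURCE A (Python) =====
-- mod = 10**9+7
--
-- def op(a, b):
--     return a*b % mod
--
-- def add(a, b):
--     return (a+b) % mod
--
-- def inv(a):
--     return pow(a, mod-2, mod)
--
-- def inverseMatrix(Mat):
--     d = len(Mat)
--     iMat = [[1 if i==j else 0 for i in range(d)] for j in range(d)]
--     for x in range(d):
--         # set Mat[x][x] != 0
--         y = x
--         for i in range(x, d):
--             if Mat[i][x] != 0:
--                 y = i
--                 break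
--         Mat[y], Mat[x] = Mat[x], Mat[y]
--         iMat[y], iMat[x] = iMat[x], iMat[y]
--
--         # set Mat[x][x] = 1
--         inva = inv(Mat[x][x])
--         for j in range(d):
--             Mat[x][j] = op(Mat[x][j], inva)
--             iMat[x][j] = op(iMat[x][j], inva)
--
--         # set Mat[i][x] = 0 for i != x
--         for i in range(d):
--             if i == x: continue
--             a = Mat[i][x]
--             for j in range(d):
--                 Mat[i][j] = add(Mat[i][j], -op(Mat[x][j], a))
--                 iMat[i][j] = add(iMat[i][j], - op(iMat[x][j], a))
--     return iMat
--
-- def PolynomialComplemention(dic):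
--     d = len(dic)
--     Mat = []
--     Arr = []
--     for b, c in dic.items():
--         Mr = []
--         p = 1
--         for _ in range(d):
--             Mr.append(p)
--             p = op(p, b)
--         Mat.append(Mr)
--         Arr.append(c)
--
--     iMat = inverseMatrix(Mat)
--     ret = []
--     for i in range(d):
--         a = 0
--         for j in range(d):
--             a = add(a, op(iMat[i][j], Arr[j]))
--         ret.append(a)
--     return ret
-- ===== SOURCE B (Python) =====
-- # Solve the Vandermonde system directly by Gauss-Jordan on an augmented vector
-- # (no inverse matrix, no final matrix-vector multiply).
-- mod = 10**9+7
--
-- def op(a, b):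
--     return a*b % mod
--
-- def add(a, b):
--     return (a+b) % mod
--
-- def inv(a):
--     return pow(a, mod-2, mod)
--
-- def PolynomialComplemention(dic):
--     d = len(dic)
--     Mat = []
--     vec = []
--     for b, c in dic.items():
--         Mr = []
--         p = 1
--         for _ in range(d):
--             Mr.append(p)
--             p = op(p, b)
--         Mat.append(Mr)
--         vec.append(c % mod)
--     for x in range(d):
--         y = x
--         for i in range(x, d):
--             if Mat[i][x] != 0:
--                 y = i
--                 break
--         Mat[y], Mat[x] = Mat[x], Mat[y]
--         vec[y], vec[x] = vec[x], vec[y]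
--         inva = inv(Mat[x][x])
--         Mat[x] = [op(t, inva) for t in Mat[x]]
--         vec[x] = op(vec[x], inva)
--         for i in range(d):
--             if i == x:
--                 continue
--             a = Mat[i][x]
--             Mat[i] = [add(t, -op(s, a)) for t, s in zip(Mat[i], Mat[x])]
--             vec[i] = add(vec[i], -op(vec[x], a))
--     return vec
-- ===== Notes on version B (the rewrite author's own statement) =====
-- stated objective: faster
-- what changed: B solves the Vandermonde linear system directly by Gauss-Jordan elimination carried on the augmented right-hand-side vector, instead of A's computing the full inverse matrix (eliminating on a whole d x d identity companion) and then multiplying it by the value vector.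
import Mathlib
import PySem

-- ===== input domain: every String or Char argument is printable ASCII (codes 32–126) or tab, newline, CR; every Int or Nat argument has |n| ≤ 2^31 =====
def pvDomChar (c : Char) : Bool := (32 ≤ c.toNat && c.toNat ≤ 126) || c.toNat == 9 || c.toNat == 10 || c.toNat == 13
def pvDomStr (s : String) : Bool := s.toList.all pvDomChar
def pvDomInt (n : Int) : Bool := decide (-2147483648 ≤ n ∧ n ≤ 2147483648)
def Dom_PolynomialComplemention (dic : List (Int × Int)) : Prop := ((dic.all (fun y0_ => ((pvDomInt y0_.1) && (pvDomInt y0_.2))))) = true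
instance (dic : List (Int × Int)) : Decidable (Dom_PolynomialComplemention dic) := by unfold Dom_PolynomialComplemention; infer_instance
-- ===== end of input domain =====

-- B solves the Vandermonde system by Gauss-Jordan elimination carried on the augmented
-- right-hand-side vector instead of computing the full inverse matrix and multiplying by it
-- (objective: faster by a constant factor; same return value).

-- shared module-level helpers of both Python files (mod, op, add, inv)
def pmod : Int := 1000000007
def pvop (a b : Int) : Int := PySem.Int.mod (a * b) pmod
def pvadd (a b : Int) : Int := PySem.Int.mod (a + b) pmod
-- pow(b, e, m) by square-and-multiply (CPython's own algorithm); same value as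
-- PySem.Int.powMod b e m, which computes b^e in full and is infeasible for e ≈ 10^9
def binPowMod (b m : Int) : Nat → Int
  | 0 => PySem.Int.mod 1 m
  | e + 1 =>
    let h := binPowMod b m ((e + 1) / 2)
    if (e + 1) % 2 = 0 then PySem.Int.mod (h * h) m else PySem.Int.mod (h * h * b) m
decreasing_by omega
def pvinv (a : Int) : Int := binPowMod a pmod 1000000005
-- Mat[i][j] (indices are always in range in both programs; getD is exact there)
def mget (M : List (List Int)) (i j : Nat) : Int := (M.getD i []).getD j 0
-- 'y = x; for i in range(x, d): if Mat[i][x] != 0: y = i; break'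
def findPivot (M : List (List Int)) (x d : Nat) : Nat :=
  match (List.range' x (d - x)).find? (fun i => mget M i x != 0) with
  | some i => i
  | none => x
-- simultaneous assignment 'L[y], L[x] = L[x], L[y]'
def swapAt {α : Type} (L : List α) (x y : Nat) (dflt : α) : List α :=
  (L.set y (L.getD x dflt)).set x (L.getD y dflt)
-- 'Mr = []; p = 1; for _ in range(d): Mr.append(p); p = op(p, b)' (same loop in both Pythons)
def powRow (b : Int) : Nat → Int → List Int
  | 0, _ => []
  | n + 1, p => p :: powRow b n (pvop p b)

-- ===== PORT A =====
-- row update 'for j in range(d): r[j] = add(r[j], -op(rx[j], a))' (rows have length d)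
def elimRow (r rx : List Int) (a : Int) : List Int :=
  List.zipWith (fun t s => pvadd t (-pvop s a)) r rx
-- one iteration x of inverseMatrix's outer loop, state (Mat, iMat)
def invStep (d : Nat) (MI : List (List Int) × List (List Int)) (x : Nat) :
    List (List Int) × List (List Int) :=
  let y := findPivot MI.1 x d
  let M1 := swapAt MI.1 x y []
  let I1 := swapAt MI.2 x y []
  let inva := pvinv (mget M1 x x)
  let M2 := M1.set x ((M1.getD x []).map (fun t => pvop t inva))
  let I2 := I1.set x ((I1.getD x []).map (fun t => pvop t inva))
  (List.range d).foldl
    (fun MI i =>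
      if i = x then MI
      else
        let a := mget MI.1 i x
        (MI.1.set i (elimRow (MI.1.getD i []) (MI.1.getD x []) a),
         MI.2.set i (elimRow (MI.2.getD i []) (MI.2.getD x []) a)))
    (M2, I2)
-- iMat = [[1 if i==j else 0 for i in range(d)] for j in range(d)]
def identityMat (d : Nat) : List (List Int) :=
  (List.range d).map (fun j => (List.range d).map (fun i => if i = j then (1 : Int) else 0))
def inverseMatrix (Mat : List (List Int)) : List (List Int) :=
  let d := Mat.length
  ((List.range d).foldl (invStep d) (Mat, identityMat d)).2
-- 'a = 0; for j in range(d): a = add(a, op(r[j], arr[j]))'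
def dotRow (r arr : List Int) (d : Nat) : Int :=
  (List.range d).foldl (fun a j => pvadd a (pvop (r.getD j 0) (arr.getD j 0))) 0
def PolynomialComplemention (dic : List (Int × Int)) : List Int :=
  let d := dic.length
  let Mat := dic.map (fun bc => powRow bc.1 d 1)
  let Arr := dic.map (fun bc => bc.2)
  let iMat := inverseMatrix Mat
  (List.range d).map (fun i => dotRow (iMat.getD i []) Arr d)

-- ===== PORT B =====
-- one iteration x of B's Gauss-Jordan loop, state (Mat, vec)
def solveStep (d : Nat) (Mv : List (List Int) × List Int) (x : Nat) :
    List (List Int) × List Int :=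
  let y := findPivot Mv.1 x d
  let M1 := swapAt Mv.1 x y []
  let v1 := swapAt Mv.2 x y 0
  let inva := pvinv (mget M1 x x)
  let M2 := M1.set x ((M1.getD x []).map (fun t => pvop t inva))
  let v2 := v1.set x (pvop (v1.getD x 0) inva)
  (List.range d).foldl
    (fun Mv i =>
      if i = x then Mv
      else
        let a := mget Mv.1 i x
        (Mv.1.set i (List.zipWith (fun t s => pvadd t (-pvop s a)) (Mv.1.getD i []) (Mv.1.getD x [])),
         Mv.2.set i (pvadd (Mv.2.getD i 0) (-pvop (Mv.2.getD x 0) a))))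
    (M2, v2)
def PolynomialComplemention_alt (dic : List (Int × Int)) : List Int :=
  let d := dic.length
  let Mat := dic.map (fun bc => powRow bc.1 d 1)
  let vec := dic.map (fun bc => PySem.Int.mod bc.2 pmod)
  ((List.range d).foldl (solveStep d) (Mat, vec)).2

-- ===== PRECONDITION & SPEC =====
-- Pre_ excludes association lists with duplicate keys: those do not represent any Python dict
-- input (a dict collapses duplicate keys), so no behaviour of the Python programs corresponds to them.
def Pre_PolynomialComplemention (dic : List (Int × Int)) : Prop :=
  (dic.map Prod.fst).Nodup
instance (dic : List (Int × Int)) : Decidable (Pre_PolynomialComplemention dic) := by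
  unfold Pre_PolynomialComplemention; infer_instance
def pvWitness_PolynomialComplemention : (List (Int × Int)) := [(0, 1), (1, 2), (2, 9)]
def Spec_PolynomialComplemention (dic : List (Int × Int)) (out : List Int) : Prop := out = PolynomialComplemention_alt dic
instance (dic : List (Int × Int)) (out : List Int) : Decidable (Spec_PolynomialComplemention dic out) := by unfold Spec_PolynomialComplemention; infer_instance

-- ===== CLAIM (what is proved, stated in full; the proofs are below) =====
def Claim_equal_PolynomialComplemention : Prop := ∀ (dic : List (Int × Int)), Dom_PolynomialComplemention dic → Pre_PolynomialComplemention dic → Spec_PolynomialComplemention dic (PolynomialComplemention dic)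

-- ===== LEMMAS AND PROOFS =====

@[simp] lemma pvop_eq (a b : Int) : pvop a b = (a * b) % pmod := by
  simp [pvop, PySem.Int.mod_eq_emod_of_pos (by norm_num [pmod] : (0:Int) < pmod)]

@[simp] lemma pvadd_eq (a b : Int) : pvadd a b = (a + b) % pmod := by
  simp [pvadd, PySem.Int.mod_eq_emod_of_pos (by norm_num [pmod] : (0:Int) < pmod)]

-- shape invariant of the iMat side: d rows, each of length d
def Ok (d : Nat) (I : List (List Int)) : Prop :=
  I.length = d ∧ ∀ r ∈ I, r.length = d

-- the relation carried through the outer loop: equal Mat, well-shaped iMat,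
-- and vec = iMat ⬝ Arr (each entry the A-style dot product with Arr)
def PVRel (d : Nat) (Arr : List Int) (p : List (List Int) × List (List Int))
    (q : List (List Int) × List Int) : Prop :=
  q.1 = p.1 ∧ Ok d p.2 ∧ q.2 = p.2.map (fun r => dotRow r Arr d)

lemma getD_map_lt {α β : Type} (f : α → β) (L : List α) (i : Nat) (h : i < L.length)
    (d0 : α) (d1 : β) : (L.map f).getD i d1 = f (L.getD i d0) := by
  rw [List.getD_eq_getElem L d0 h, List.getD_eq_getElem _ d1 (by simpa using h)]
  simp

lemma dot_char (r arr : List Int) (d : Nat) :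
    dotRow r arr d = (∑ j ∈ Finset.range d, r.getD j 0 * arr.getD j 0) % pmod := by
  induction d with
  | zero => simp [dotRow]
  | succ d ih =>
    have h1 : dotRow r arr (d + 1)
        = pvadd (dotRow r arr d) (pvop (r.getD d 0) (arr.getD d 0)) := by
      simp [dotRow, List.range_succ]
    rw [h1, ih, Finset.sum_range_succ, pvadd_eq, pvop_eq]
    conv_rhs => rw [Int.add_emod]

lemma dot_scale (r arr : List Int) (d : Nat) (c : Int) (h : d ≤ r.length) :
    dotRow (r.map (fun t => pvop t c)) arr d = pvop (dotRow r arr d) c := by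
  rw [dot_char, dot_char, pvop_eq]
  have hsum : ∀ j ∈ Finset.range d,
      ((r.map fun t => pvop t c).getD j 0) * arr.getD j 0
        = ((r.getD j 0 * c) % pmod) * arr.getD j 0 := by
    intro j hj
    rw [getD_map_lt _ _ _ (lt_of_lt_of_le (Finset.mem_range.mp hj) h) 0 0, pvop_eq]
  rw [Finset.sum_congr rfl hsum]
  have l : (∑ j ∈ Finset.range d, ((r.getD j 0 * c) % pmod) * arr.getD j 0)
      ≡ ∑ j ∈ Finset.range d, (r.getD j 0 * c) * arr.getD j 0 [ZMOD pmod] :=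
    Int.ModEq.sum (fun j _ => (Int.mod_modEq _ _).mul_right _)
  have rr : ((∑ j ∈ Finset.range d, r.getD j 0 * arr.getD j 0) % pmod) * c
      ≡ (∑ j ∈ Finset.range d, r.getD j 0 * arr.getD j 0) * c [ZMOD pmod] :=
    (Int.mod_modEq _ _).mul_right c
  calc (∑ j ∈ Finset.range d, ((r.getD j 0 * c) % pmod) * arr.getD j 0) % pmod
      = (∑ j ∈ Finset.range d, (r.getD j 0 * c) * arr.getD j 0) % pmod := l
    _ = ((∑ j ∈ Finset.range d, r.getD j 0 * arr.getD j 0) * c) % pmod := by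
        rw [Finset.sum_mul]; congr 1; apply Finset.sum_congr rfl; intro j _; ring
    _ = (((∑ j ∈ Finset.range d, r.getD j 0 * arr.getD j 0) % pmod) * c) % pmod := rr.symm

lemma dot_elim (r rx arr : List Int) (d : Nat) (c : Int)
    (hr : r.length = d) (hx : rx.length = d) :
    dotRow (elimRow r rx c) arr d = pvadd (dotRow r arr d) (-pvop (dotRow rx arr d) c) := by
  rw [dot_char, dot_char, dot_char, pvadd_eq, pvop_eq]
  have hlen : (elimRow r rx c).length = d := by simp [elimRow, hr, hx]
  have hsum : ∀ j ∈ Finset.range d,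
      (elimRow r rx c).getD j 0 * arr.getD j 0
        = ((r.getD j 0 + -((rx.getD j 0 * c) % pmod)) % pmod) * arr.getD j 0 := by
    intro j hj
    have hj' := Finset.mem_range.mp hj
    rw [List.getD_eq_getElem _ 0 (by omega : j < (elimRow r rx c).length)]
    simp only [elimRow, List.getElem_zipWith, pvadd_eq, pvop_eq]
    rw [List.getD_eq_getElem r 0 (by omega), List.getD_eq_getElem rx 0 (by omega)]
  rw [Finset.sum_congr rfl hsum]
  have l : (∑ j ∈ Finset.range d, ((r.getD j 0 + -((rx.getD j 0 * c) % pmod)) % pmod) * arr.getD j 0)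
      ≡ ∑ j ∈ Finset.range d, (r.getD j 0 - rx.getD j 0 * c) * arr.getD j 0 [ZMOD pmod] := by
    refine Int.ModEq.sum (fun j _ => Int.ModEq.mul_right _ ?_)
    calc (r.getD j 0 + -((rx.getD j 0 * c) % pmod)) % pmod
        ≡ r.getD j 0 + -((rx.getD j 0 * c) % pmod) [ZMOD pmod] := Int.mod_modEq _ _
      _ ≡ r.getD j 0 + -(rx.getD j 0 * c) [ZMOD pmod] :=
          Int.ModEq.add_left _ (Int.ModEq.neg (Int.mod_modEq _ _))
      _ = r.getD j 0 - rx.getD j 0 * c := by ring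
  have rrr : ((∑ j ∈ Finset.range d, r.getD j 0 * arr.getD j 0) % pmod
        + -((((∑ j ∈ Finset.range d, rx.getD j 0 * arr.getD j 0) % pmod) * c) % pmod))
      ≡ (∑ j ∈ Finset.range d, r.getD j 0 * arr.getD j 0)
        + -((∑ j ∈ Finset.range d, rx.getD j 0 * arr.getD j 0) * c) [ZMOD pmod] := by
    refine Int.ModEq.add (Int.mod_modEq _ _) (Int.ModEq.neg ?_)
    calc (((∑ j ∈ Finset.range d, rx.getD j 0 * arr.getD j 0) % pmod) * c) % pmod
        ≡ ((∑ j ∈ Finset.range d, rx.getD j 0 * arr.getD j 0) % pmod) * c [ZMOD pmod] :=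
          Int.mod_modEq _ _
      _ ≡ (∑ j ∈ Finset.range d, rx.getD j 0 * arr.getD j 0) * c [ZMOD pmod] :=
          (Int.mod_modEq _ _).mul_right c
  calc (∑ j ∈ Finset.range d, ((r.getD j 0 + -((rx.getD j 0 * c) % pmod)) % pmod) * arr.getD j 0) % pmod
      = (∑ j ∈ Finset.range d, (r.getD j 0 - rx.getD j 0 * c) * arr.getD j 0) % pmod := l
    _ = ((∑ j ∈ Finset.range d, r.getD j 0 * arr.getD j 0)
          + -((∑ j ∈ Finset.range d, rx.getD j 0 * arr.getD j 0) * c)) % pmod := by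
        congr 1
        rw [Finset.sum_mul, ← Finset.sum_neg_distrib, ← Finset.sum_add_distrib]
        apply Finset.sum_congr rfl; intro j _; ring
    _ = ((∑ j ∈ Finset.range d, r.getD j 0 * arr.getD j 0) % pmod
          + -((((∑ j ∈ Finset.range d, rx.getD j 0 * arr.getD j 0) % pmod) * c) % pmod)) % pmod :=
        rrr.symm

lemma map_swapAt {α β : Type} (f : α → β) (L : List α) (x y : Nat)
    (hx : x < L.length) (hy : y < L.length) (da : α) (db : β) :
    (swapAt L x y da).map f = swapAt (L.map f) x y db := by
  simp only [swapAt, List.map_set]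
  rw [getD_map_lt f L x hx da db, getD_map_lt f L y hy da db]

lemma Ok_swapAt {d : Nat} {I : List (List Int)} (h : Ok d I) (x y : Nat)
    (hx : x < d) (hy : y < d) : Ok d (swapAt I x y []) := by
  obtain ⟨hlen, hrows⟩ := h
  constructor
  · simp [swapAt, hlen]
  · intro r hr
    have h1 := List.mem_or_eq_of_mem_set hr
    rcases h1 with h1 | h1
    · rcases List.mem_or_eq_of_mem_set h1 with h2 | h2
      · exact hrows r h2
      · subst h2
        exact hrows _ (by rw [List.getD_eq_getElem I [] (by omega)]; exact List.getElem_mem _)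
    · subst h1
      exact hrows _ (by rw [List.getD_eq_getElem I [] (by omega)]; exact List.getElem_mem _)

lemma Ok_set {d : Nat} {I : List (List Int)} (h : Ok d I) (i : Nat) {r : List Int}
    (hr : r.length = d) : Ok d (I.set i r) := by
  obtain ⟨hlen, hrows⟩ := h
  refine ⟨by simp [hlen], ?_⟩
  intro s hs
  rcases List.mem_or_eq_of_mem_set hs with h1 | h1
  · exact hrows s h1
  · subst h1; exact hr

lemma Ok_row {d : Nat} {I : List (List Int)} (h : Ok d I) {i : Nat} (hi : i < d) :
    (I.getD i []).length = d := by
  obtain ⟨hlen, hrows⟩ := h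
  rw [List.getD_eq_getElem I [] (by omega)]
  exact hrows _ (List.getElem_mem _)

lemma findPivot_lt (M : List (List Int)) (x d : Nat) (hx : x < d) : findPivot M x d < d := by
  unfold findPivot
  cases hf : (List.range' x (d - x)).find? (fun i => mget M i x != 0) with
  | none => exact hx
  | some i =>
    have h1 := List.mem_range'_1.mp (List.mem_of_find?_eq_some hf)
    show i < d
    omega

-- two folds over the same index list preserve a relation preserved by each step
lemma foldl_rel {S T : Type} (P : S → T → Prop) (fA : S → Nat → S) (fB : T → Nat → T)
    (l : List Nat) (hstep : ∀ s t i, i ∈ l → P s t → P (fA s i) (fB t i)) :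
    ∀ s t, P s t → P (l.foldl fA s) (l.foldl fB t) := by
  induction l with
  | nil => intro s t h; exact h
  | cons i l ih =>
    intro s t h
    simp only [List.foldl_cons]
    exact ih (fun s t j hj => hstep s t j (List.mem_cons_of_mem i hj))
      _ _ (hstep s t i List.mem_cons_self h)

lemma step_rel (d : Nat) (Arr : List Int) (p : List (List Int) × List (List Int))
    (q : List (List Int) × List Int) (x : Nat) (hx : x < d) (h : PVRel d Arr p q) :
    PVRel d Arr (invStep d p x) (solveStep d q x) := by
  obtain ⟨hM, hOk, hv⟩ := h
  simp only [invStep, solveStep]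
  rw [hM, hv]
  set dot := fun r => dotRow r Arr d with hdot
  set y := findPivot p.1 x d with hy
  have hyd : y < d := findPivot_lt p.1 x d hx
  set M1 := swapAt p.1 x y [] with hM1
  set I1 := swapAt p.2 x y [] with hI1
  have hOk1 : Ok d I1 := Ok_swapAt hOk x y hx hyd
  have hswap : swapAt (p.2.map dot) x y 0 = I1.map dot := by
    rw [hI1, map_swapAt dot p.2 x y (by rw [hOk.1]; exact hx) (by rw [hOk.1]; exact hyd) [] 0]
  rw [hswap]
  set inva := pvinv (mget M1 x x) with hinva
  set M2 := M1.set x ((M1.getD x []).map fun t => pvop t inva) with hM2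
  set I2 := I1.set x ((I1.getD x []).map fun t => pvop t inva) with hI2
  have hOk2 : Ok d I2 := Ok_set hOk1 x (by rw [List.length_map]; exact Ok_row hOk1 hx)
  have hscale : (I1.map dot).set x (pvop ((I1.map dot).getD x 0) inva) = I2.map dot := by
    rw [hI2, List.map_set]
    congr 1
    rw [getD_map_lt dot I1 x (by rw [hOk1.1]; exact hx) [] 0]
    exact (dot_scale _ Arr d inva (by rw [Ok_row hOk1 hx])).symm
  rw [hscale]
  -- the elimination fold
  refine foldl_rel (PVRel d Arr) _ _ (List.range d) ?_ (M2, I2) (M2, I2.map dot)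
    ⟨rfl, hOk2, rfl⟩
  intro s t i hi hP
  by_cases hix : i = x
  · simpa [hix] using hP
  · obtain ⟨hM', hOk', hv'⟩ := hP
    simp only [if_neg hix]
    rw [hM', hv']
    have hid : i < d := by simpa using hi
    have hlen2 : ∀ a, (elimRow (s.2.getD i []) (s.2.getD x []) a).length = d := by
      intro a
      unfold elimRow
      rw [List.length_zipWith, Ok_row hOk' hid, Ok_row hOk' hx]
      exact Nat.min_self d
    refine ⟨rfl, Ok_set hOk' i (hlen2 _), ?_⟩
    show (List.map dot s.2).set i _ = List.map dot (s.2.set i _)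
    rw [List.map_set]
    congr 1
    rw [getD_map_lt dot s.2 i (by rw [hOk'.1]; exact hid) [] 0,
        getD_map_lt dot s.2 x (by rw [hOk'.1]; exact hx) [] 0]
    exact (dot_elim _ _ Arr d _ (Ok_row hOk' hid) (Ok_row hOk' hx)).symm

lemma dot_identity (arr : List Int) (d j : Nat) (hj : j < d) :
    dotRow ((List.range d).map (fun i => if i = j then (1 : Int) else 0)) arr d
      = arr.getD j 0 % pmod := by
  rw [dot_char]
  congr 1
  have hsum : ∀ i ∈ Finset.range d,
      ((List.range d).map (fun i => if i = j then (1 : Int) else 0)).getD i 0 * arr.getD i 0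
        = if i = j then arr.getD i 0 else 0 := by
    intro i hi
    rw [PySem.List.getD_map_range _ d i 0 (Finset.mem_range.mp hi)]
    by_cases h : i = j <;> simp [h]
  rw [Finset.sum_congr rfl hsum, Finset.sum_ite_eq' (Finset.range d) j (fun i => arr.getD i 0)]
  simp [Finset.mem_range.mpr hj]

lemma Ok_identity (d : Nat) : Ok d (identityMat d) := by
  refine ⟨by simp [identityMat], ?_⟩
  intro r hr
  simp only [identityMat, List.mem_map] at hr
  obtain ⟨j, _, rfl⟩ := hr
  simp

-- ===== VERDICT (by name: the statement is the Claim_ definition above) =====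
theorem PolynomialComplemention_spec : Claim_equal_PolynomialComplemention := by
  intro dic _ _
  unfold Spec_PolynomialComplemention
  simp only [PolynomialComplemention, PolynomialComplemention_alt, inverseMatrix]
  set d := dic.length with hd
  set Mat := dic.map (fun bc => powRow bc.1 d 1) with hMat
  set Arr := dic.map (fun bc => bc.2) with hArr
  set vec := dic.map (fun bc => PySem.Int.mod bc.2 pmod) with hvec
  set dot := fun r => dotRow r Arr d with hdot
  have hMatlen : Mat.length = d := by rw [hMat, List.length_map, hd]
  rw [hMatlen]
  have hinit : PVRel d Arr (Mat, identityMat d) (Mat, vec) := by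
    refine ⟨rfl, Ok_identity d, ?_⟩
    show vec = (identityMat d).map dot
    rw [hvec]
    apply List.ext_getElem
    · simp [identityMat, ← hd]
    · intro i h1 h2
      have hidic : i < dic.length := by simpa using h1
      have hid : i < d := by rw [hd]; exact hidic
      simp only [identityMat, List.map_map, List.getElem_map, List.getElem_range,
        Function.comp_apply]
      rw [hdot]
      simp only []
      rw [dot_identity Arr d i hid,
          PySem.Int.mod_eq_emod_of_pos (by norm_num [pmod] : (0:Int) < pmod)]
      congr 1
      rw [hArr, getD_map_lt (fun bc => bc.2) dic i hidic (0,0) 0,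
          List.getD_eq_getElem dic (0,0) hidic]
  have hfin := foldl_rel (PVRel d Arr) (invStep d) (solveStep d) (List.range d)
    (fun s t i hi hP => step_rel d Arr s t i (by simpa using hi) hP) _ _ hinit
  obtain ⟨-, hOkF, hvF⟩ := hfin
  rw [hvF]
  apply List.ext_getElem
  · simp [hOkF.1]
  · intro i h1 h2
    have hid : i < d := by simpa using h1
    have hid2 : i < ((List.range d).foldl (invStep d) (Mat, identityMat d)).2.length := by
      rw [hOkF.1]; exact hid
    simp only [List.getElem_map, List.getElem_range]
    rw [List.getD_eq_getElem _ [] hid2]
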